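-- pv_equiv track=rewrite | github.com/godfredO/dsa | twoEdgeConnectedGraph.py | getMinimumArrivalTimeOfAncestors
-- ===== SOURCE A (Python) =====
-- def getMinimumArrivalTimeOfAncestors(currentVertex,parent,currentTime,arrivalTimes,edges):
--     arrivalTimes[currentVertex] = currentTime #set the arrival time at current vertex/node
--     minimumArrivalTime = currentTime #initialize the min ancestor arrival time as the discovery time of current vertex
--     for destination in edges[currentVertex]: #dfs of outbound edges of current vertex
--         if arrivalTimes[destination] == -1 : #if destination isnt discovered yet ie arrival time is initial value
--             minimumArrivalTime = min(minimumArrivalTime, getMinimumArrivalTimeOfAncestors(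
--                 destination,currentVertex,currentTime+1,arrivalTimes,edges
--                 )) #call dfs on descendant and update the minimum ancestor time with minimum ancestor reachable by descendant
--         elif destination != parent: #if destination already visited and is not the parent whose tree edge discovered current
--             minimumArrivalTime = min(minimumArrivalTime, arrivalTimes[destination]) #then update with its min ancestor time
--     if minimumArrivalTime == currentTime and parent != -1:#a bridge was detected if forward edges and not at startVertex
--         return -1
--     return minimumArrivalTime
--
-- edges = [
--     [1, 2, 5],
--     [0, 2],
--     [0, 1, 3],
--     [2, 4, 5],
--     [3, 5],
--     [0, 3, 4]
--   ]
-- ===== SOURCE B (Python) =====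
-- # Iterative explicit-stack DFS (same neighbor order and same in-place arrivalTimes
-- # mutation as the recursive original); return-value equivalence is what is proved.
-- def getMinimumArrivalTimeOfAncestors(currentVertex,parent,currentTime,arrivalTimes,edges):
--     arrivalTimes[currentVertex] = currentTime
--     stack = [(currentVertex, parent, currentTime, list(edges[currentVertex]), currentTime)]
--     while True:
--         v, p, t, rest, m = stack.pop()
--         pushed = False
--         while rest:
--             d = rest[0]
--             rest = rest[1:]
--             if arrivalTimes[d] == -1:
--                 stack.append((v, p, t, rest, m))
--                 arrivalTimes[d] = t + 1
--                 stack.append((d, v, t + 1, list(edges[d]), t + 1))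
--                 pushed = True
--                 break
--             elif d != p:
--                 m = min(m, arrivalTimes[d])
--         if pushed:
--             continue
--         ret = -1 if (m == t and p != -1) else m
--         if not stack:
--             return ret
--         pv, pp, pt, prest, pm = stack.pop()
--         stack.append((pv, pp, pt, prest, min(pm, ret)))
-- ===== Notes on version B (the rewrite author's own statement) =====
-- stated objective: alternative
-- what changed: The recursive DFS is replaced by an iterative DFS with an explicit stack of frames (vertex, parent, time, remaining neighbors, running minimum); a finished frame folds its bridge-checked value into its parent's running minimum on the stack.
import Mathlib
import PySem

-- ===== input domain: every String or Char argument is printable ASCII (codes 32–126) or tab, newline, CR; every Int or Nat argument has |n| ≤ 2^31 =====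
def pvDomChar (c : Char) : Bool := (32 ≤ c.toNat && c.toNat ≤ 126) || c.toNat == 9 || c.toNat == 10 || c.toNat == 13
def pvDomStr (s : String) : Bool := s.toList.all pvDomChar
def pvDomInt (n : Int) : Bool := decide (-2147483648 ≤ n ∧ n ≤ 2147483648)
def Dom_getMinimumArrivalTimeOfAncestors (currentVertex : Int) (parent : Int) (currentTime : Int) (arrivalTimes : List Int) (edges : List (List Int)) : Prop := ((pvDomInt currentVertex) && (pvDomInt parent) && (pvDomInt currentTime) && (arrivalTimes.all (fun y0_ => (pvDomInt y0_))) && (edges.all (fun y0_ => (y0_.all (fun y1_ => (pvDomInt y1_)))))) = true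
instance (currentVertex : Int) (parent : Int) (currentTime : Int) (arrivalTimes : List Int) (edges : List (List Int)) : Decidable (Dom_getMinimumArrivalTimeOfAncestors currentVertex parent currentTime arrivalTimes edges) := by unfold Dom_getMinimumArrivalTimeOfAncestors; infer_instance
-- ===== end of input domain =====

-- B replaces A's recursive DFS by an iterative explicit-stack DFS (same neighbor order,
-- same in-place arrivalTimes mutation); the equivalence proved is about the return value.

-- ===== PORT A =====
-- A's recursion has no structural measure, so the port carries a fuel counter as a
-- totality guard (depth of the recursion); fuel 2*len(arrivalTimes)+2 is proved
-- sufficient under Pre_.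
def pvLoopA (dfs : Int → Int → Int → List Int → Option (Int × List Int))
    (nbrs : List Int) (v p t m : Int) (arr : List Int) : Option (Int × List Int) :=
  match nbrs with
  | [] => some (m, arr)
  | d :: rest =>
    match PySem.List.pyGet? arr d with             -- arrivalTimes[destination]
    | none => none
    | some ad =>
      if ad = -1 then
        match dfs d v (t + 1) arr with
        | none => none
        | some (r, arr') => pvLoopA dfs rest v p t (min m r) arr'
      else if d ≠ p then pvLoopA dfs rest v p t (min m ad) arr
      else pvLoopA dfs rest v p t m arr

def pvDfsA : Nat → Int → Int → Int → List Int → List (List Int) → Option (Int × List Int)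
  | 0, _, _, _, _, _ => none
  | fuel + 1, v, p, t, arr, ed =>
    match PySem.List.pySet? arr v t with           -- arrivalTimes[currentVertex] = currentTime
    | none => none
    | some arr1 =>
      match PySem.List.pyGet? ed v with            -- edges[currentVertex]
      | none => none
      | some nbrs =>
        match pvLoopA (fun d pv tt a => pvDfsA fuel d pv tt a ed) nbrs v p t t arr1 with
        | none => none
        | some (m, arr2) => some (if m = t ∧ p ≠ -1 then -1 else m, arr2)

def getMinimumArrivalTimeOfAncestors (currentVertex : Int) (parent : Int) (currentTime : Int) (arrivalTimes : List Int) (edges : List (List Int)) : Int :=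
  match pvDfsA (2 * arrivalTimes.length + 2) currentVertex parent currentTime arrivalTimes edges with
  | some (r, _) => r
  | none => 0

-- ===== PORT B =====
-- frame = (v, parent, time, remaining neighbors, running minimum); the explicit while
-- loop carries a fuel counter (number of pops) as a totality guard, proved sufficient
-- under Pre_ (pvDeg = the largest neighbor-list length enters the bound).
def pvDeg (ed : List (List Int)) : Nat := ed.foldr (fun l m => max l.length m) 0

def pvScanB (step : List (Int × Int × Int × List Int × Int) → List Int → Option Int)
    (v p t : Int) (rest : List Int) (m : Int)
    (s : List (Int × Int × Int × List Int × Int)) (arr : List Int)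
    (ed : List (List Int)) : Option Int :=
  match rest with
  | d :: rest' =>
    match PySem.List.pyGet? arr d with
    | none => none
    | some ad =>
      if ad = -1 then
        match PySem.List.pySet? arr d (t + 1), PySem.List.pyGet? ed d with
        | some arr', some nb =>
          step ((d, v, t + 1, nb, t + 1) :: (v, p, t, rest', m) :: s) arr'
        | _, _ => none
      else if d ≠ p then pvScanB step v p t rest' (min m ad) s arr ed
      else pvScanB step v p t rest' m s arr ed
  | [] =>
    let ret := if m = t ∧ p ≠ -1 then -1 else m
    match s with
    | [] => some ret
    | (pv, pp, pt, pr, pm) :: s' => step ((pv, pp, pt, pr, min pm ret) :: s') arr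

def pvStepB : Nat → List (Int × Int × Int × List Int × Int) → List Int → List (List Int) → Option Int
  | 0, _, _, _ => none
  | _ + 1, [], _, _ => none
  | fuel + 1, (v, p, t, rest, m) :: s, arr, ed =>
    pvScanB (fun st a => pvStepB fuel st a ed) v p t rest m s arr ed

def getMinimumArrivalTimeOfAncestors_alt (currentVertex : Int) (parent : Int) (currentTime : Int) (arrivalTimes : List Int) (edges : List (List Int)) : Int :=
  match PySem.List.pySet? arrivalTimes currentVertex currentTime,
        PySem.List.pyGet? edges currentVertex with
  | some arr1, some nb =>
    match pvStepB (2 * (2 * pvDeg edges + 1) * arrivalTimes.length + 3 * pvDeg edges + 1)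
        [(currentVertex, parent, currentTime, nb, currentTime)] arr1 edges with
    | some r => r
    | none => 0
  | _, _ => 0

-- ===== PRECONDITION & SPEC =====
-- Pre_ is the graph domain on which A is exception-free (no IndexError): the start
-- vertex is a valid Python index into both lists, and every vertex reachable from it
-- through undiscovered slots (arrival time -1, after the start vertex is stamped) has
-- only neighbor indices in Python's valid index range [-len, len) of both lists
-- (negative indices wrap around); pvReachOK checks this along paths up to depth
-- 2*len+2, beyond every shortest path, so it is exactly reachability.
-- Python's normalized index for i in the valid range [-n, n)
def pvIdx (n : Nat) (i : Int) : Nat := if 0 ≤ i then i.toNat else n - (-i).toNat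

def pvInR (la le : Nat) (d : Int) : Bool :=
  decide (-(la : Int) ≤ d) && decide (d < (la : Int)) &&
  decide (-(le : Int) ≤ d) && decide (d < (le : Int))

def pvReachOK (ed : List (List Int)) (base : List Int) : Nat → Int → Bool
  | 0, _ => true
  | k + 1, x =>
    (ed.getD (pvIdx ed.length x) []).all (fun d =>
      pvInR base.length ed.length d &&
      (!(base.getD (pvIdx base.length d) 0 == -1) || pvReachOK ed base k d))

def Pre_getMinimumArrivalTimeOfAncestors (currentVertex : Int) (parent : Int) (currentTime : Int) (arrivalTimes : List Int) (edges : List (List Int)) : Prop :=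
  pvInR arrivalTimes.length edges.length currentVertex = true ∧
  pvReachOK edges (arrivalTimes.set (pvIdx arrivalTimes.length currentVertex) currentTime)
    (2 * arrivalTimes.length + 2) currentVertex = true
instance (currentVertex : Int) (parent : Int) (currentTime : Int) (arrivalTimes : List Int) (edges : List (List Int)) : Decidable (Pre_getMinimumArrivalTimeOfAncestors currentVertex parent currentTime arrivalTimes edges) := by unfold Pre_getMinimumArrivalTimeOfAncestors; infer_instance

def pvWitness_getMinimumArrivalTimeOfAncestors : Int × Int × Int × List Int × List (List Int) :=
  (0, -1, 0, [-1, -1], [[1], [0]])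

def Spec_getMinimumArrivalTimeOfAncestors (currentVertex : Int) (parent : Int) (currentTime : Int) (arrivalTimes : List Int) (edges : List (List Int)) (out : Int) : Prop := out = getMinimumArrivalTimeOfAncestors_alt currentVertex parent currentTime arrivalTimes edges
instance (currentVertex : Int) (parent : Int) (currentTime : Int) (arrivalTimes : List Int) (edges : List (List Int)) (out : Int) : Decidable (Spec_getMinimumArrivalTimeOfAncestors currentVertex parent currentTime arrivalTimes edges out) := by unfold Spec_getMinimumArrivalTimeOfAncestors; infer_instance

-- ===== CLAIM (what is proved, stated in full; the proofs are below) =====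
def Claim_equal_getMinimumArrivalTimeOfAncestors : Prop := ∀ (currentVertex : Int) (parent : Int) (currentTime : Int) (arrivalTimes : List Int) (edges : List (List Int)), Dom_getMinimumArrivalTimeOfAncestors currentVertex parent currentTime arrivalTimes edges → Pre_getMinimumArrivalTimeOfAncestors currentVertex parent currentTime arrivalTimes edges → Spec_getMinimumArrivalTimeOfAncestors currentVertex parent currentTime arrivalTimes edges (getMinimumArrivalTimeOfAncestors currentVertex parent currentTime arrivalTimes edges)

-- ===== LEMMAS AND PROOFS =====

-- the machine's action after a subtree finished with value r: fold r into the top frame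
def pvFinishB (f : Nat) (s : List (Int × Int × Int × List Int × Int)) (arr : List Int)
    (ed : List (List Int)) (r : Int) : Option Int :=
  match s with
  | [] => some r
  | (pv, pp, pt, pr, pm) :: s' => pvStepB f ((pv, pp, pt, pr, min pm r) :: s') arr ed

-- depth potential: a recursive call strictly decreases 2*count(-1) + pvInd
def pvInd (t : Int) : Nat := if t < -1 then 1 else 0

-- pop-count slack available at time t (only t = -2 can rewrite a -1 slot with -1)
def pvSlk (D : Nat) (t : Int) : Nat := if t = -2 then 3 * D else 0

-- "arr is at least as discovered as base": every undiscovered slot of arr is one of base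
def pvMk (base arr : List Int) : Prop :=
  ∀ i : Nat, i < base.length → arr.getD i 0 = -1 → base.getD i 0 = -1

lemma pv_pyIdx_eq (n : Nat) (i : Int) (h0 : -(n : Int) ≤ i) (h1 : i < (n : Int)) :
    PySem.List.pyIdx? n i = some (pvIdx n i) ∧ pvIdx n i < n := by
  unfold PySem.List.pyIdx? pvIdx
  split_ifs <;> constructor <;> first | rfl | omega

lemma pv_pyGet_eq (arr : List Int) (i : Int) (h0 : -(arr.length : Int) ≤ i)
    (h1 : i < (arr.length : Int)) :
    PySem.List.pyGet? arr i = some (arr.getD (pvIdx arr.length i) 0) := by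
  obtain ⟨he, hlt⟩ := pv_pyIdx_eq arr.length i h0 h1
  simp [PySem.List.pyGet?, he, List.getElem?_eq_getElem hlt, List.getD_eq_getElem arr 0 hlt]

lemma pv_pySet_eq (arr : List Int) (i x : Int) (h0 : -(arr.length : Int) ≤ i)
    (h1 : i < (arr.length : Int)) :
    PySem.List.pySet? arr i x = some (arr.set (pvIdx arr.length i) x) := by
  obtain ⟨he, _⟩ := pv_pyIdx_eq arr.length i h0 h1
  simp [PySem.List.pySet?, he]

lemma pv_pyGetL_eq (ed : List (List Int)) (i : Int) (h0 : -(ed.length : Int) ≤ i)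
    (h1 : i < (ed.length : Int)) :
    PySem.List.pyGet? ed i = some (ed.getD (pvIdx ed.length i) []) := by
  obtain ⟨he, hlt⟩ := pv_pyIdx_eq ed.length i h0 h1
  simp [PySem.List.pyGet?, he, List.getElem?_eq_getElem hlt, List.getD_eq_getElem ed [] hlt]

lemma pv_count_set (xs : List Int) (i : Nat) (hi : i < xs.length) (h : xs[i] = -1)
    (x : Int) :
    (xs.set i x).count (-1) + 1 = xs.count (-1) + (if x = -1 then 1 else 0) := by
  induction xs generalizing i with
  | nil => simp at hi
  | cons a l ih =>
    cases i with
    | zero =>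
      simp at h
      subst h
      simp [List.count_cons]
      split_ifs <;> simp_all <;> omega
    | succ j =>
      simp at hi h
      simp [List.count_cons]
      have := ih j hi h
      split_ifs at * <;> omega

lemma pv_le_deg (ed : List (List Int)) (l : List Int) (h : l ∈ ed) :
    l.length ≤ pvDeg ed := by
  induction ed with
  | nil => simp at h
  | cons a es ih =>
    rcases List.mem_cons.mp h with rfl | h'
    · simp [pvDeg]
    · calc l.length ≤ pvDeg es := ih h'
        _ ≤ pvDeg (a :: es) := by simp [pvDeg]

lemma pv_getD_set_self (xs : List Int) (j : Nat) (hj : j < xs.length) (x : Int) :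
    (xs.set j x).getD j 0 = x := by
  rw [List.getD_eq_getElem _ 0 (by simpa using hj)]
  exact List.getElem_set_self _

lemma pv_getD_set_ne (xs : List Int) (j i : Nat) (hi : i < xs.length) (x : Int)
    (hne : i ≠ j) :
    (xs.set j x).getD i 0 = xs.getD i 0 := by
  rw [List.getD_eq_getElem _ 0 (by simpa using hi), List.getD_eq_getElem _ 0 hi]
  rw [List.getElem_set]
  simp [Ne.symm hne]

-- marking a slot (whose old value is -1 when the new one is) preserves pvMk
lemma pv_mk_set (base arr : List Int) (hlen : arr.length = base.length)
    (hmk : pvMk base arr) (j : Nat) (hj : j < arr.length) (x : Int)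
    (hx : x = -1 → arr.getD j 0 = -1) :
    pvMk base (arr.set j x) := by
  intro i hi hneg
  by_cases hij : i = j
  · subst hij
    rw [pv_getD_set_self arr i (by omega) x] at hneg
    exact hmk i hi (hx hneg)
  · rw [pv_getD_set_ne arr j i (by omega) x hij] at hneg
    exact hmk i hi hneg

-- neighbor-loop step of the combined invariant (IH = the invariant for pvDfsA at this fuel)
lemma pvMainLoop (fuel : Nat) (ed : List (List Int)) (base : List Int)
    (IH : ∀ (v p t : Int) (arr : List Int),
      arr.length = base.length →
      pvInR arr.length ed.length v = true →
      pvReachOK ed base fuel v = true →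
      pvMk base (arr.set (pvIdx arr.length v) t) →
      2 * (arr.set (pvIdx arr.length v) t).count (-1) + pvInd t < fuel →
      ∃ r arr' c, pvDfsA fuel v p t arr ed = some (r, arr') ∧ arr'.length = arr.length ∧
        arr'.count (-1) ≤ (arr.set (pvIdx arr.length v) t).count (-1) ∧
        pvMk base arr' ∧
        c + 2 * (2 * pvDeg ed + 1) * arr'.count (-1)
          ≤ 2 * (2 * pvDeg ed + 1) * (arr.set (pvIdx arr.length v) t).count (-1) + pvSlk (pvDeg ed) t ∧
        ∀ (s : List (Int × Int × Int × List Int × Int)) (f : Nat),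
          pvStepB (c + 1 + f) ((v, p, t, ed.getD (pvIdx ed.length v) [], t) :: s)
              (arr.set (pvIdx arr.length v) t) ed
            = pvFinishB f s arr' ed r) :
    ∀ (nbrs : List Int),
    (∀ d ∈ nbrs, pvInR base.length ed.length d = true) →
    (∀ d ∈ nbrs, base.getD (pvIdx base.length d) 0 = -1 → pvReachOK ed base fuel d = true) →
    ∀ (v p t m : Int) (arr : List Int), arr.length = base.length →
    pvMk base arr →
    2 * arr.count (-1) + pvInd t ≤ fuel →
    ∃ m2 arr2 c,
      pvLoopA (fun d pv tt a => pvDfsA fuel d pv tt a ed) nbrs v p t m arr = some (m2, arr2) ∧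
      arr2.length = arr.length ∧
      arr2.count (-1) ≤ arr.count (-1) ∧
      pvMk base arr2 ∧
      c + 2 * (2 * pvDeg ed + 1) * arr2.count (-1)
        ≤ 2 * (2 * pvDeg ed + 1) * arr.count (-1) + (if t = -2 then 3 * nbrs.length else 0) ∧
      ∀ (s : List (Int × Int × Int × List Int × Int)) (f : Nat),
        pvScanB (fun st a => pvStepB (c + f) st a ed) v p t nbrs m s arr ed
          = pvFinishB f s arr2 ed (if m2 = t ∧ p ≠ -1 then -1 else m2) := by
  intro nbrs
  induction nbrs with
  | nil =>
    intro _ _ v p t m arr hlen hmk hcnt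
    refine ⟨m, arr, 0, by simp [pvLoopA], rfl, le_refl _, hmk, by split_ifs <;> omega, ?_⟩
    intro s f
    rcases s with _ | ⟨⟨pv, pp, pt, pr, pm⟩, s'⟩ <;> simp [pvScanB, pvFinishB]
  | cons d rest ih =>
    intro hb hbOK v p t m arr hlen hmk hcnt
    have hd : pvInR base.length ed.length d = true := hb d (by simp)
    have hd' : -(arr.length : Int) ≤ d ∧ d < (arr.length : Int) ∧
        -(ed.length : Int) ≤ d ∧ d < (ed.length : Int) := by
      rw [hlen]
      unfold pvInR at hd
      simp at hd
      omega
    have hrest : ∀ x ∈ rest, pvInR base.length ed.length x = true :=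
      fun x hx => hb x (by simp [hx])
    have hrestOK : ∀ x ∈ rest, base.getD (pvIdx base.length x) 0 = -1 →
        pvReachOK ed base fuel x = true :=
      fun x hx => hbOK x (by simp [hx])
    obtain ⟨-, hdlt⟩ := pv_pyIdx_eq arr.length d (by omega) (by omega)
    have hget : PySem.List.pyGet? arr d = some (arr.getD (pvIdx arr.length d) 0) :=
      pv_pyGet_eq arr d (by omega) (by omega)
    rw [List.getD_eq_getElem arr 0 hdlt] at hget
    by_cases had : arr[pvIdx arr.length d] = -1
    · -- undiscovered neighbor: recurse / push a child frame
      have hgd : arr.getD (pvIdx arr.length d) 0 = -1 := by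
        rw [List.getD_eq_getElem arr 0 hdlt]; exact had
      have hidxb : pvIdx base.length d = pvIdx arr.length d := by rw [hlen]
      have hbase : base.getD (pvIdx base.length d) 0 = -1 := by
        rw [hidxb]
        exact hmk _ (by omega) hgd
      have hOKd : pvReachOK ed base fuel d = true := hbOK d (by simp) hbase
      have hce := pv_count_set arr (pvIdx arr.length d) hdlt had (t + 1)
      have hindle : pvInd (t + 1) ≤ 1 := by unfold pvInd; split_ifs <;> omega
      have hindt : pvInd t ≤ 1 := by unfold pvInd; split_ifs <;> omega
      have hcnt1 : 1 ≤ arr.count (-1) := by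
        have : (-1 : Int) ∈ arr := had ▸ List.getElem_mem hdlt
        exact List.count_pos_iff.mpr this
      have hmkC : pvMk base (arr.set (pvIdx arr.length d) (t + 1)) :=
        pv_mk_set base arr hlen hmk _ hdlt (t + 1) (fun _ => hgd)
      have hfuelC : 2 * (arr.set (pvIdx arr.length d) (t + 1)).count (-1) + pvInd (t + 1) < fuel := by
        by_cases ht2 : t = -2
        · have he1 : (t + 1 : Int) = -1 := by omega
          rw [if_pos he1] at hce
          have h1 : pvInd t = 1 := by unfold pvInd; split_ifs <;> omega
          have h2 : pvInd (t + 1) = 0 := by unfold pvInd; split_ifs <;> omega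
          omega
        · have he1 : (t + 1 : Int) ≠ -1 := by omega
          rw [if_neg he1] at hce
          omega
      have hdr : pvInR arr.length ed.length d = true := by
        unfold pvInR
        simp
        omega
      obtain ⟨r, arrC, cD, hdfs, hlenC, hmonoC, hmkCo, hboundC, hsimC⟩ :=
        IH d v (t + 1) arr (by omega) hdr hOKd hmkC hfuelC
      have hmono0 : (arr.set (pvIdx arr.length d) (t + 1)).count (-1) ≤ arr.count (-1) := by
        split_ifs at hce <;> omega
      obtain ⟨m2, arr2, cR, hloop, hlen2, hmono2, hmk2, hbound2, hsim2⟩ :=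
        ih hrest hrestOK v p t (min m r) arrC (by omega) hmkCo (by omega)
      refine ⟨m2, arr2, cD + cR + 2, ?_, by omega, by omega, hmk2, ?_, ?_⟩
      · simp only [pvLoopA, hget, had, if_pos rfl]
        rw [hdfs]
        exact hloop
      · -- pop-count accounting
        by_cases ht2 : t = -2
        · have he1 : (t + 1 : Int) = -1 := by omega
          rw [if_pos he1] at hce
          have hceq : (arr.set (pvIdx arr.length d) (t + 1)).count (-1) = arr.count (-1) := by
            omega
          have hslk : pvSlk (pvDeg ed) (t + 1) = 0 := by
            unfold pvSlk; rw [if_neg (by omega)]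
          rw [hslk, hceq] at hboundC
          rw [if_pos ht2] at hbound2 ⊢
          have : (3 : Nat) * (d :: rest).length = 3 * rest.length + 3 := by
            simp [List.length_cons]; ring
          rw [this]
          linarith
        · have he1 : (t + 1 : Int) ≠ -1 := by omega
          rw [if_neg he1] at hce
          have hslk : pvSlk (pvDeg ed) (t + 1) ≤ 3 * pvDeg ed := by
            unfold pvSlk; split_ifs <;> omega
          rw [if_neg ht2] at hbound2 ⊢
          have hKcnt : 2 * (2 * pvDeg ed + 1) * arr.count (-1)
              = 2 * (2 * pvDeg ed + 1) * (arr.set (pvIdx arr.length d) (t + 1)).count (-1)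
                + 2 * (2 * pvDeg ed + 1) := by
            have h1 : arr.count (-1) = (arr.set (pvIdx arr.length d) (t + 1)).count (-1) + 1 := by omega
            rw [h1]; ring
          linarith
      · intro s f
        have hset : PySem.List.pySet? arr d (t + 1) = some (arr.set (pvIdx arr.length d) (t + 1)) :=
          pv_pySet_eq arr d (t + 1) (by omega) (by omega)
        have hged : PySem.List.pyGet? ed d = some (ed.getD (pvIdx ed.length d) []) :=
          pv_pyGetL_eq ed d (by omega) (by omega)
        rw [pvScanB]
        simp only [hget, had, if_pos rfl, hset, hged]
        rw [show cD + cR + 2 + f = cD + 1 + (cR + f + 1) by omega]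
        rw [hsimC ((v, p, t, rest, m) :: s) (cR + f + 1)]
        rw [pvFinishB, pvStepB]
        exact hsim2 s f
    · by_cases hdp : d = p
      · obtain ⟨m2, arr2, c, hloop, hlen2, hmono2, hmk2, hbound2, hsim2⟩ :=
          ih hrest hrestOK v p t m arr hlen hmk hcnt
        refine ⟨m2, arr2, c, ?_, hlen2, hmono2, hmk2, ?_, ?_⟩
        · rw [pvLoopA]
          simp only [hget]
          rw [if_neg had, if_neg (by simp [hdp])]
          exact hloop
        · split_ifs at hbound2 ⊢ <;> simp [List.length_cons] <;> linarith
        · intro s f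
          rw [pvScanB]
          simp only [hget]
          rw [if_neg had, if_neg (by simp [hdp])]
          exact hsim2 s f
      · obtain ⟨m2, arr2, c, hloop, hlen2, hmono2, hmk2, hbound2, hsim2⟩ :=
          ih hrest hrestOK v p t (min m arr[pvIdx arr.length d]) arr hlen hmk hcnt
        refine ⟨m2, arr2, c, ?_, hlen2, hmono2, hmk2, ?_, ?_⟩
        · rw [pvLoopA]
          simp only [hget]
          rw [if_neg had, if_pos hdp]
          exact hloop
        · split_ifs at hbound2 ⊢ <;> simp [List.length_cons] <;> linarith
        · intro s f
          rw [pvScanB]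
          simp only [hget]
          rw [if_neg had, if_pos hdp]
          exact hsim2 s f

-- the combined sufficiency + simulation invariant, one induction on fuel
lemma pvMain (fuel : Nat) (ed : List (List Int)) (base : List Int) :
    ∀ (v p t : Int) (arr : List Int),
    arr.length = base.length →
    pvInR arr.length ed.length v = true →
    pvReachOK ed base fuel v = true →
    pvMk base (arr.set (pvIdx arr.length v) t) →
    2 * (arr.set (pvIdx arr.length v) t).count (-1) + pvInd t < fuel →
    ∃ r arr' c,
      pvDfsA fuel v p t arr ed = some (r, arr') ∧
      arr'.length = arr.length ∧
      arr'.count (-1) ≤ (arr.set (pvIdx arr.length v) t).count (-1) ∧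
      pvMk base arr' ∧
      c + 2 * (2 * pvDeg ed + 1) * arr'.count (-1)
        ≤ 2 * (2 * pvDeg ed + 1) * (arr.set (pvIdx arr.length v) t).count (-1) + pvSlk (pvDeg ed) t ∧
      ∀ (s : List (Int × Int × Int × List Int × Int)) (f : Nat),
        pvStepB (c + 1 + f) ((v, p, t, ed.getD (pvIdx ed.length v) [], t) :: s)
            (arr.set (pvIdx arr.length v) t) ed
          = pvFinishB f s arr' ed r := by
  induction fuel with
  | zero => intro v p t arr _ _ _ _ hfuel; omega
  | succ fu IH =>
    intro v p t arr hlen hvr hOK hmk hfuel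
    have hv' : -(arr.length : Int) ≤ v ∧ v < (arr.length : Int) ∧
        -(ed.length : Int) ≤ v ∧ v < (ed.length : Int) := by
      unfold pvInR at hvr
      simp at hvr
      omega
    have hset : PySem.List.pySet? arr v t = some (arr.set (pvIdx arr.length v) t) :=
      pv_pySet_eq arr v t (by omega) (by omega)
    have hged : PySem.List.pyGet? ed v = some (ed.getD (pvIdx ed.length v) []) :=
      pv_pyGetL_eq ed v (by omega) (by omega)
    obtain ⟨-, hvlt⟩ := pv_pyIdx_eq ed.length v (by omega) (by omega)
    have hmem : ed.getD (pvIdx ed.length v) [] ∈ ed := by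
      rw [List.getD_eq_getElem ed [] hvlt]
      exact List.getElem_mem _
    rw [pvReachOK] at hOK
    simp only [List.all_eq_true, Bool.and_eq_true, Bool.or_eq_true, Bool.not_eq_true',
      beq_eq_false_iff_ne, ne_eq] at hOK
    have hb : ∀ d ∈ ed.getD (pvIdx ed.length v) [], pvInR base.length ed.length d = true :=
      fun d hdm => (hOK d hdm).1
    have hbOK : ∀ d ∈ ed.getD (pvIdx ed.length v) [],
        base.getD (pvIdx base.length d) 0 = -1 → pvReachOK ed base fu d = true := by
      intro d hdm hneg
      rcases (hOK d hdm).2 with h | h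
      · exact absurd hneg h
      · exact h
    obtain ⟨m2, arr2, c, hloop, hlen2, hmono, hmk2, hbound, hsim⟩ :=
      pvMainLoop fu ed base IH (ed.getD (pvIdx ed.length v) []) hb hbOK v p t t
        (arr.set (pvIdx arr.length v) t) (by simp [hlen]) hmk (by omega)
    refine ⟨if m2 = t ∧ p ≠ -1 then -1 else m2, arr2, c, ?_, by simpa using hlen2, hmono, hmk2, ?_, ?_⟩
    · rw [pvDfsA]
      simp only [hset, hged]
      rw [hloop]
    · have hdeg : (ed.getD (pvIdx ed.length v) []).length ≤ pvDeg ed := pv_le_deg ed _ hmem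
      unfold pvSlk
      split_ifs at hbound ⊢ <;> omega
    · intro s f
      rw [show c + 1 + f = (c + f) + 1 by omega]
      rw [pvStepB]
      exact hsim s f

-- ===== VERDICT (by name: the statement is the Claim_ definition above) =====
theorem getMinimumArrivalTimeOfAncestors_spec : Claim_equal_getMinimumArrivalTimeOfAncestors := by
  intro cv p t arr ed _ hPre
  obtain ⟨hvr, hOK⟩ := hPre
  unfold Spec_getMinimumArrivalTimeOfAncestors
  have hv' : -(arr.length : Int) ≤ cv ∧ cv < (arr.length : Int) ∧
      -(ed.length : Int) ≤ cv ∧ cv < (ed.length : Int) := by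
    unfold pvInR at hvr
    simp at hvr
    omega
  have hcle : (arr.set (pvIdx arr.length cv) t).count (-1) ≤ arr.length := by
    have := List.count_le_length (l := arr.set (pvIdx arr.length cv) t) (a := (-1 : Int))
    simpa using this
  have hind : pvInd t ≤ 1 := by unfold pvInd; split_ifs <;> omega
  obtain ⟨r, arr', c, hdfs, hlen', hmono, hmk', hbound, hsim⟩ :=
    pvMain (2 * arr.length + 2) ed (arr.set (pvIdx arr.length cv) t) cv p t arr
      (by simp) hvr hOK (fun i hi h => h) (by omega)
  have hset : PySem.List.pySet? arr cv t = some (arr.set (pvIdx arr.length cv) t) :=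
    pv_pySet_eq arr cv t (by omega) (by omega)
  have hged : PySem.List.pyGet? ed cv = some (ed.getD (pvIdx ed.length cv) []) :=
    pv_pyGetL_eq ed cv (by omega) (by omega)
  have hc : c ≤ 2 * (2 * pvDeg ed + 1) * arr.length + 3 * pvDeg ed := by
    have hmul : 2 * (2 * pvDeg ed + 1) * (arr.set (pvIdx arr.length cv) t).count (-1)
        ≤ 2 * (2 * pvDeg ed + 1) * arr.length :=
      Nat.mul_le_mul_left _ hcle
    have hslk : pvSlk (pvDeg ed) t ≤ 3 * pvDeg ed := by
      unfold pvSlk; split_ifs <;> omega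
    omega
  have hrun := hsim [] (2 * (2 * pvDeg ed + 1) * arr.length + 3 * pvDeg ed - c)
  rw [show c + 1 + (2 * (2 * pvDeg ed + 1) * arr.length + 3 * pvDeg ed - c)
      = 2 * (2 * pvDeg ed + 1) * arr.length + 3 * pvDeg ed + 1 by omega] at hrun
  simp only [pvFinishB] at hrun
  unfold getMinimumArrivalTimeOfAncestors getMinimumArrivalTimeOfAncestors_alt
  rw [List.getD_eq_getElem?_getD] at hrun
  simp [hdfs, hset, hged, hrun]
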